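-- pv_equiv track=rewrite | github.com/rphlo/py-retricon | retricon/retricon.py | fill_pixels_hori_sym
-- ===== SOURCE A (Python) =====
-- import math
--
-- def fill_pixels_hori_sym(raw, dimension):
--     mid = int(math.ceil(dimension / 2.0))
--     pic = [None] * dimension
--     for row in range(dimension):
--         pic[row] = [None] * dimension
--         for col in range(dimension):
--             if row < mid:
--                 ii = (row * dimension) + col
--             else:
--                 ii = (dimension - 1 - row) * dimension + col
--             pic[row][col] = raw['pixels'][ii]
--     return pic
-- ===== SOURCE B (Python) =====
-- import math
--
-- def fill_pixels_hori_sym(raw, dimension):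
--     mid = int(math.ceil(dimension / 2.0))
--     top = [[raw['pixels'][row * dimension + col] for col in range(dimension)]
--            for row in range(mid)]
--     return top + [list(r) for r in reversed(top[:dimension - mid])]
-- ===== Notes on version B (the rewrite author's own statement) =====
-- stated objective: simpler
-- what changed: B builds only the top half of the grid once and forms the bottom half by reversing (copies of) a prefix of the already-built top rows, instead of computing a mirrored source index for every cell of every row.
import Mathlib
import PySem

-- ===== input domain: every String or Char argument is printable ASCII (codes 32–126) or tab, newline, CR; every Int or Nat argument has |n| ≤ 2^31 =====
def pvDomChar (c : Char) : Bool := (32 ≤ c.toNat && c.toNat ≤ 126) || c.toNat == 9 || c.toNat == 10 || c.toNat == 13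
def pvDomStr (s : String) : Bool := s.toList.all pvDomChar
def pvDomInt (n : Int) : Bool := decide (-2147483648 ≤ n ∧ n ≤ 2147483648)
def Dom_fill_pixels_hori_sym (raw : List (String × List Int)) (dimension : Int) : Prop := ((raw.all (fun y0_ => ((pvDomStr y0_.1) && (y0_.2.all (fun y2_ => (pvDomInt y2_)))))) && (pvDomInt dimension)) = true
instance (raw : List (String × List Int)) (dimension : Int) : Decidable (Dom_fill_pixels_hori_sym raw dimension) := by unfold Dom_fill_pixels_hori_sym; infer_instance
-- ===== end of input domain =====

-- B builds only the top half of the grid and mirrors it, instead of computing a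
-- reflected source index for every cell of the bottom half (objective: simpler).

-- ===== PORT A =====
-- mid = int(math.ceil(dimension / 2.0)) : for |dimension| ≤ 2^31 the float division is
-- exact, and ceil(d/2) = (d+1) // 2; the per-cell assignment loop becomes a map.
def fill_pixels_hori_sym (raw : List (String × List Int)) (dimension : Int) : List (List Int) :=
  let mid : Int := PySem.Int.floordiv (dimension + 1) 2
  let px : List Int := (PySem.Dict.get? (PySem.Dict.mk raw) "pixels").getD []
  (PySem.List.pyRange 0 dimension 1).map (fun row =>
    (PySem.List.pyRange 0 dimension 1).map (fun col =>
      let ii : Int := if row < mid then row * dimension + col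
                      else (dimension - 1 - row) * dimension + col
      PySem.List.pyGetD px ii 0))

-- ===== PORT B =====
def fill_pixels_hori_sym_alt (raw : List (String × List Int)) (dimension : Int) : List (List Int) :=
  let mid : Int := PySem.Int.floordiv (dimension + 1) 2
  let top : List (List Int) :=
    (PySem.List.pyRange 0 mid 1).map (fun row =>
      (PySem.List.pyRange 0 dimension 1).map (fun col =>
        PySem.List.pyGetD ((PySem.Dict.get? (PySem.Dict.mk raw) "pixels").getD []) (row * dimension + col) 0))
  top ++ (PySem.List.slice top none (some (dimension - mid))).reverse

-- ===== PRECONDITION & SPEC =====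
-- Pre_ excludes exactly the inputs where A raises: for dimension > 0, a missing 'pixels'
-- key (KeyError) or a pixels list shorter than mid*dimension (IndexError); for
-- dimension ≤ 0 the loop body never runs, so A returns [] unconditionally.
def Pre_fill_pixels_hori_sym (raw : List (String × List Int)) (dimension : Int) : Prop :=
  dimension ≤ 0 ∨
    (∃ px, PySem.Dict.get? (PySem.Dict.mk raw) "pixels" = some px ∧
      PySem.Int.floordiv (dimension + 1) 2 * dimension ≤ (px.length : Int))
instance (raw : List (String × List Int)) (dimension : Int) : Decidable (Pre_fill_pixels_hori_sym raw dimension) := by unfold Pre_fill_pixels_hori_sym; infer_instance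
def pvWitness_fill_pixels_hori_sym : (List (String × List Int)) × Int :=
  ([("pixels", [1, 2, 3, 4, 5, 6])], 3)

def Spec_fill_pixels_hori_sym (raw : List (String × List Int)) (dimension : Int) (out : List (List Int)) : Prop := out = fill_pixels_hori_sym_alt raw dimension
instance (raw : List (String × List Int)) (dimension : Int) (out : List (List Int)) : Decidable (Spec_fill_pixels_hori_sym raw dimension out) := by unfold Spec_fill_pixels_hori_sym; infer_instance

-- ===== CLAIM (what is proved, stated in full; the proofs are below) =====
def Claim_equal_fill_pixels_hori_sym : Prop := ∀ (raw : List (String × List Int)) (dimension : Int), Dom_fill_pixels_hori_sym raw dimension → Pre_fill_pixels_hori_sym raw dimension → Spec_fill_pixels_hori_sym raw dimension (fill_pixels_hori_sym raw dimension)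

-- ===== LEMMAS AND PROOFS =====

theorem pv_split (px : List Int) (d mid : Int) (cs : List Int)
    (h0m : 0 ≤ mid) (hmd : mid ≤ d) (hsym : d - mid ≤ mid) :
    (PySem.List.pyRange 0 d 1).map (fun row => cs.map (fun col =>
        PySem.List.pyGetD px (if row < mid then row * d + col else (d - 1 - row) * d + col) 0))
    = ((PySem.List.pyRange 0 mid 1).map (fun row => cs.map (fun col => PySem.List.pyGetD px (row * d + col) 0)))
      ++ (PySem.List.slice ((PySem.List.pyRange 0 mid 1).map (fun row => cs.map (fun col => PySem.List.pyGetD px (row * d + col) 0))) none (some (d - mid))).reverse := by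
  rw [PySem.List.pyRange_one_append 0 mid d h0m hmd, List.map_append]
  congr 1
  · apply List.map_congr_left
    intro row hrow
    have h : row < mid := (PySem.List.mem_pyRange_one.mp hrow).2
    simp [if_pos h]
  · rw [PySem.List.slice_to _ (show (0:Int) ≤ d - mid by omega)]
    apply List.ext_getElem
    · simp [PySem.List.length_pyRange_one]
      omega
    · intro k h1 h2
      have hk : k < (d - mid).toNat := by
        simpa [PySem.List.length_pyRange_one] using h1
      rw [List.getElem_map, PySem.List.getElem_pyRange_one, List.getElem_reverse,
        List.getElem_take, List.getElem_map, PySem.List.getElem_pyRange_one]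
      have hnot : ¬ (mid + (k : Int) < mid) := by omega
      simp only [if_neg hnot]
      have harg : d - 1 - (mid + (k : Int))
          = 0 + ((min (d - mid).toNat (mid - 0).toNat - 1 - k : Nat) : Int) := by omega
      rw [harg]
      simp only [List.length_take, List.length_map, PySem.List.length_pyRange_one]

theorem pv_main (raw : List (String × List Int)) (dimension : Int) :
    fill_pixels_hori_sym raw dimension = fill_pixels_hori_sym_alt raw dimension := by
  unfold fill_pixels_hori_sym fill_pixels_hori_sym_alt
  set mid : Int := PySem.Int.floordiv (dimension + 1) 2 with hmid
  set px : List Int := (PySem.Dict.get? (PySem.Dict.mk raw) "pixels").getD [] with hpx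
  have hdm : mid * 2 ≤ dimension + 1 ∧ dimension + 1 < (mid + 1) * 2 := by
    constructor
    · exact (PySem.Int.le_floordiv_iff_mul_le (by omega)).mp (le_of_eq hmid.symm)
    · exact (PySem.Int.floordiv_lt_iff_lt_mul (by omega)).mp (by omega)
  rcases (by omega : dimension ≤ 0 ∨ 0 < dimension) with hd | hd
  · have h1 : PySem.List.pyRange 0 dimension 1 = [] := PySem.List.pyRange_one_eq_nil (by omega)
    have h2 : PySem.List.pyRange 0 mid 1 = [] := PySem.List.pyRange_one_eq_nil (by omega)
    simp [h1, h2, PySem.List.slice]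
  · exact pv_split px dimension mid (PySem.List.pyRange 0 dimension 1)
      (by omega) (by omega) (by omega)

-- ===== VERDICT (by name: the statement is the Claim_ definition above) =====
theorem fill_pixels_hori_sym_spec : Claim_equal_fill_pixels_hori_sym := by
  intro raw dimension _ _
  exact pv_main raw dimension
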